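-- pv_equiv track=rewrite | github.com/Tuugii0526/dsa | tutorial/05-arrays/problems/03-02-maximum-index.py | solution
-- ===== SOURCE A (Python) =====
-- def solution(arr):
--     valueIndexArray=[]
--     for i in range(len(arr)):
--         valueIndexArray.append([arr[i],i])
--     valueIndexArray.sort(key= lambda x:x[0] )
--     mx=0
--     minIndex= valueIndexArray[0][1]
--     for i in range(1,len(valueIndexArray)):
--         mx=max(mx,valueIndexArray[i][1]-minIndex)
--         minIndex=min(minIndex,valueIndexArray[i][1])
--     return mx
-- ===== SOURCE B (Python) =====
-- def solution(arr):
--     n = len(arr)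
--     if n == 0:
--         return 0
--     rmax = [0] * n
--     rmax[n - 1] = arr[n - 1]
--     for j in range(n - 2, -1, -1):
--         rmax[j] = arr[j] if arr[j] > rmax[j + 1] else rmax[j + 1]
--     i = 0
--     j = 0
--     best = 0
--     while i < n and j < n:
--         if arr[i] <= rmax[j]:
--             if j - i > best:
--                 best = j - i
--             j += 1
--         else:
--             i += 1
--     return best
-- ===== Notes on version B (the rewrite author's own statement) =====
-- stated objective: faster
-- what changed: Replaces the sort of (value,index) pairs followed by a running-min scan with a linear suffix-max array plus a two-pointer sweep, removing the O(n log n) sort.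
import Mathlib
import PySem

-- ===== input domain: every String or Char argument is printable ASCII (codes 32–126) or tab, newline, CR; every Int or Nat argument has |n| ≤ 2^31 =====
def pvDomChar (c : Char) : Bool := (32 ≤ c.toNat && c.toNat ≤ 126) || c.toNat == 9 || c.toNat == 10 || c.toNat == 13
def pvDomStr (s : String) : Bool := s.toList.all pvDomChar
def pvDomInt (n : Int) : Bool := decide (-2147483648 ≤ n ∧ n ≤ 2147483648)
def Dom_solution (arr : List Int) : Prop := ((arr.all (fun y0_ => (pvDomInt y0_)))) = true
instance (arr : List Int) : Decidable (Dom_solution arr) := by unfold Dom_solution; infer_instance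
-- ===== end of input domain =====

-- B replaces A's sort of (value,index) pairs + running-min scan by a linear suffix-max
-- array and a two-pointer sweep (objective: faster, O(n) instead of O(n log n)).

-- ===== PORT A =====
-- valueIndexArray: the loop 'for i in range(len(arr)): append([arr[i], i])';
-- the 2-element Python list [arr[i], i] is ported as the pair (arr[i], i).
-- arr[i] for i drawn from range(len(arr)) is always in range, so pyGetD with a
-- default is exact here.
def solution (arr : List Int) : Int :=
  let valueIndexArray : List (Int × Int) :=
    (PySem.List.pyRange 0 (PySem.List.len arr)).foldl
      (fun acc i => acc ++ [(PySem.List.pyGetD arr i 0, i)]) []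
  let sortedVIA := PySem.List.sorted valueIndexArray (fun x => x.1)
  match sortedVIA with
  | [] => 0   -- Python raises IndexError on 'valueIndexArray[0][1]' here; excluded by Pre_solution
  | (_, i0) :: _ =>
    -- mx=0; minIndex=sortedVIA[0][1]; for i in range(1,len): mx=max(..); minIndex=min(..)
    let res := (PySem.List.pyRange 1 (PySem.List.len sortedVIA)).foldl
      (fun (st : Int × Int) i =>
        let e := PySem.List.pyGetD sortedVIA i (0, 0)
        (max st.1 (e.2 - st.2), min st.2 e.2)) (0, i0)
    res.1

-- ===== PORT B =====
-- the backward loop 'for j in range(n-2,-1,-1): rmax[j] = max-ish' builds the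
-- suffix-max array from the right; ported as the obvious right-to-left recursion
-- computing the same cells in the same order.
def buildRmax : List Int → List Int
  | [] => []
  | [x] => [x]
  | x :: y :: t =>
    let r := buildRmax (y :: t)
    (if x > r.headD 0 then x else r.headD 0) :: r

-- the while loop 'while i < n and j < n: …' with its two Python int counters;
-- i and j only ever take values 0..n, kept as Nat with the comparisons intact.
def twoPtr (arr rmax : List Int) (i j : Nat) (best : Int) : Int :=
  if _h : i < arr.length ∧ j < arr.length then
    if arr.getD i 0 ≤ rmax.getD j 0 then
      twoPtr arr rmax i (j + 1)
        (if (j : Int) - (i : Int) > best then (j : Int) - (i : Int) else best)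
    else
      twoPtr arr rmax (i + 1) j best
  else best
termination_by (arr.length - i) + (arr.length - j)
decreasing_by all_goals omega

def solution_alt (arr : List Int) : Int :=
  if arr.length = 0 then 0
  else twoPtr arr (buildRmax arr) 0 0 0

-- ===== PRECONDITION & SPEC =====
-- Pre_ excludes only the empty list, on which A raises IndexError.
def Pre_solution (arr : List Int) : Prop := arr ≠ []
instance (arr : List Int) : Decidable (Pre_solution arr) := by unfold Pre_solution; infer_instance
def pvWitness_solution : List Int := [3, 1, 2]

def Spec_solution (arr : List Int) (out : Int) : Prop := out = solution_alt arr
instance (arr : List Int) (out : Int) : Decidable (Spec_solution arr out) := by unfold Spec_solution; infer_instance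

-- ===== CLAIM =====
def Claim_equal_solution : Prop := ∀ (arr : List Int), Dom_solution arr → Pre_solution arr → Spec_solution arr (solution arr)

-- ===== LEMMAS AND PROOFS =====

-- the candidate set: x is a witnessed index gap b - a with a ≤ b and arr[a] ≤ arr[b]
def Cand (arr : List Int) (x : Int) : Prop :=
  ∃ a b : Nat, a ≤ b ∧ b < arr.length ∧ arr.getD a 0 ≤ arr.getD b 0 ∧ x = (b : Int) - (a : Int)

def IsAns (arr : List Int) (x : Int) : Prop :=
  Cand arr x ∧ ∀ y, Cand arr y → y ≤ x

theorem isAns_unique {arr : List Int} {x y : Int} (hx : IsAns arr x) (hy : IsAns arr y) : x = y :=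
  le_antisymm (hy.2 x hx.1) (hx.2 y hy.1)

-- ---------- B side: the suffix-max array and the two-pointer sweep ----------

theorem buildRmax_spec : ∀ (l : List Int) (j : Nat), j < l.length →
    (∀ b, j ≤ b → b < l.length → l.getD b 0 ≤ (buildRmax l).getD j 0) ∧
    (∃ b, j ≤ b ∧ b < l.length ∧ (buildRmax l).getD j 0 = l.getD b 0) := by
  intro l
  induction l using buildRmax.induct with
  | case1 => intro j hj; simp at hj
  | case2 x =>
    intro j hj
    simp only [List.length_singleton, Nat.lt_one_iff] at hj
    subst hj
    refine ⟨?_, 0, le_rfl, by simp, by simp [buildRmax]⟩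
    intro b hb hb1
    simp only [List.length_singleton, Nat.lt_one_iff] at hb1
    subst hb1; simp [buildRmax]
  | case3 x y t ih =>
    have hne : buildRmax (y :: t) ≠ [] := by
      cases t <;> simp [buildRmax]
    have hbx : buildRmax (x :: y :: t) =
        (if x > (buildRmax (y :: t)).headD 0 then x else (buildRmax (y :: t)).headD 0) ::
          buildRmax (y :: t) := by
      rw [buildRmax]
    have hhead : (buildRmax (y :: t)).headD 0 = (buildRmax (y :: t)).getD 0 0 := by
      cases hb : buildRmax (y :: t) with
      | nil => exact absurd hb hne
      | cons a m => simp
    have hget0 : (buildRmax (x :: y :: t)).getD 0 0 =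
        if x > (buildRmax (y :: t)).headD 0 then x else (buildRmax (y :: t)).headD 0 := by
      rw [hbx]; rfl
    have hgetS : ∀ k : Nat, (buildRmax (x :: y :: t)).getD (k + 1) 0 =
        (buildRmax (y :: t)).getD k 0 := by
      intro k; rw [hbx]; rfl
    intro j hj
    cases j with
    | zero =>
      obtain ⟨hub, b0, hb0, hb0n, hb0e⟩ := ih 0 (by simp)
      constructor
      · intro b _ hbn
        have hx : x ≤ (buildRmax (x :: y :: t)).getD 0 0 := by
          rw [hget0, hhead]; split <;> omega
        have hr : (buildRmax (y :: t)).getD 0 0 ≤ (buildRmax (x :: y :: t)).getD 0 0 := by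
          rw [hget0, hhead]; split <;> omega
        cases b with
        | zero => simpa using hx
        | succ b' =>
          have := hub b' (Nat.zero_le _) (by simpa using hbn)
          simp only [List.getD_cons_succ]
          omega
      · by_cases hgt : x > (buildRmax (y :: t)).headD 0
        · exact ⟨0, le_rfl, by simp, by rw [hget0, if_pos hgt]; rfl⟩
        · refine ⟨b0 + 1, Nat.zero_le _, by simpa using hb0n, ?_⟩
          rw [hget0, if_neg hgt, hhead, List.getD_cons_succ]
          exact hb0e
    | succ j' =>
      have hj' : j' < (y :: t).length := by simpa using hj
      obtain ⟨hub, b0, hb0, hb0n, hb0e⟩ := ih j' hj'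
      constructor
      · intro b hb hbn
        cases b with
        | zero => omega
        | succ b' =>
          have := hub b' (by omega) (by simpa using hbn)
          rw [hgetS, List.getD_cons_succ]
          exact this
      · refine ⟨b0 + 1, by omega, by simpa using hb0n, ?_⟩
        rw [hgetS, List.getD_cons_succ]
        exact hb0e

theorem twoPtr_isAns (arr rmax : List Int)
    (R1 : ∀ j b : Nat, j ≤ b → b < arr.length → arr.getD b 0 ≤ rmax.getD j 0)
    (R2 : ∀ j : Nat, j < arr.length → ∃ b, j ≤ b ∧ b < arr.length ∧ rmax.getD j 0 = arr.getD b 0) :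
    ∀ (fuel i j : Nat) (best : Int),
      (arr.length - i) + (arr.length - j) ≤ fuel → i ≤ j → j ≤ arr.length →
      (∃ c, Cand arr c ∧ best ≤ c) →
      (∀ a b : Nat, a ≤ b → b < arr.length → arr.getD a 0 ≤ arr.getD b 0 →
        (a < i ∨ b < j) → (b : Int) - (a : Int) ≤ best) →
      IsAns arr (twoPtr arr rmax i j best) := by
  have endCase : ∀ (i j : Nat) (best : Int), ¬ (i < arr.length ∧ j < arr.length) →
      i ≤ j → j ≤ arr.length →
      (∃ c, Cand arr c ∧ best ≤ c) →
      (∀ a b : Nat, a ≤ b → b < arr.length → arr.getD a 0 ≤ arr.getD b 0 →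
        (a < i ∨ b < j) → (b : Int) - (a : Int) ≤ best) →
      IsAns arr best := by
    intro i j best hstop hij hjn hc hcov
    have hjn' : j = arr.length := by omega
    have hall : ∀ y, Cand arr y → y ≤ best := by
      rintro y ⟨a, b, hab, hbn, hv, rfl⟩
      exact hcov a b hab hbn hv (Or.inr (by omega))
    obtain ⟨c, hc, hbc⟩ := hc
    have : best = c := le_antisymm hbc (hall c hc)
    exact ⟨this ▸ hc, hall⟩
  intro fuel
  induction fuel with
  | zero =>
    intro i j best hf hij hjn hc hcov
    have hstop : ¬ (i < arr.length ∧ j < arr.length) := by omega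
    rw [twoPtr, dif_neg hstop]
    exact endCase i j best hstop hij hjn hc hcov
  | succ f ihf =>
    intro i j best hf hij hjn hc hcov
    by_cases hcont : i < arr.length ∧ j < arr.length
    · rw [twoPtr, dif_pos hcont]
      by_cases hle : arr.getD i 0 ≤ rmax.getD j 0
      · rw [if_pos hle]
        set best' := if (j : Int) - (i : Int) > best then (j : Int) - (i : Int) else best with hb'
        have hbb' : best ≤ best' ∧ (j : Int) - (i : Int) ≤ best' := by
          rw [hb']; split <;> omega
        apply ihf i (j + 1) best' (by omega) (by omega) (by omega)
        · by_cases hgt : (j : Int) - (i : Int) > best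
          · obtain ⟨b, hjb, hbn, hr⟩ := R2 j hcont.2
            refine ⟨(b : Int) - (i : Int), ⟨i, b, by omega, hbn, by rw [← hr]; exact hle, rfl⟩, ?_⟩
            rw [hb', if_pos hgt]; omega
          · obtain ⟨c, hcand, hbc⟩ := hc
            exact ⟨c, hcand, by rw [hb', if_neg hgt]; omega⟩
        · intro a b hab hbn hv hor
          rcases hor with ha | hb
          · exact le_trans (hcov a b hab hbn hv (Or.inl ha)) hbb'.1
          · by_cases hbj : b < j
            · exact le_trans (hcov a b hab hbn hv (Or.inr hbj)) hbb'.1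
            · have hbj' : b = j := by omega
              by_cases hai : a < i
              · exact le_trans (hcov a b hab hbn hv (Or.inl hai)) hbb'.1
              · have : (b : Int) - (a : Int) ≤ (j : Int) - (i : Int) := by omega
                omega
      · rw [if_neg hle]
        have hij' : i < j := by
          rcases Nat.lt_or_ge i j with h | h
          · exact h
          · exfalso
            have hij0 : i = j := by omega
            exact hle (hij0 ▸ R1 j j le_rfl hcont.2)
        apply ihf (i + 1) j best (by omega) (by omega) hjn hc
        intro a b hab hbn hv hor
        rcases hor with ha | hb
        · by_cases ha' : a < i
          · exact hcov a b hab hbn hv (Or.inl ha')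
          · have hai : a = i := by omega
            by_cases hbj : b < j
            · exact hcov a b hab hbn hv (Or.inr hbj)
            · exfalso
              have : arr.getD b 0 ≤ rmax.getD j 0 := R1 j b (by omega) hbn
              exact hle (le_trans (hai ▸ hv) this)
        · exact hcov a b hab hbn hv (Or.inr hb)
    · rw [twoPtr, dif_neg hcont]
      exact endCase i j best hcont hij hjn hc hcov

theorem alt_isAns (arr : List Int) (h : arr ≠ []) : IsAns arr (solution_alt arr) := by
  have hn : 0 < arr.length := List.length_pos_iff.mpr h
  unfold solution_alt
  rw [if_neg (by omega)]
  apply twoPtr_isAns arr (buildRmax arr)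
    (fun j b hjb hbn => (buildRmax_spec arr j (by omega)).1 b hjb hbn)
    (fun j hj => (buildRmax_spec arr j hj).2)
    (2 * arr.length) 0 0 0 (by omega) le_rfl (by omega)
  · exact ⟨0, ⟨0, 0, le_rfl, hn, le_rfl, by norm_num⟩, le_rfl⟩
  · intro a b _ _ _ hor; omega

-- ---------- A side: the stable sort of (value, index) pairs ----------

-- the (value, index) pair list A builds, written over Nat indices
def enumF (arr : List Int) : List (Int × Int) :=
  (List.range arr.length).map (fun a => (arr.getD a 0, (a : Int)))

-- lexicographic order on (value, index): what stability gives A's sorted list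
def lexVI (a b : Int × Int) : Prop := a.1 < b.1 ∨ (a.1 = b.1 ∧ a.2 < b.2)

theorem solution_eq (arr : List Int) :
    solution arr = (match PySem.List.sorted (enumF arr) (fun x => x.1) with
      | [] => (0 : Int)
      | (_, i0) :: t =>
        (t.foldl (fun (st : Int × Int) e => (max st.1 (e.2 - st.2), min st.2 e.2)) (0, i0)).1) := by
  unfold solution enumF
  rw [PySem.List.foldl_append_singleton_eq_map (fun i => (PySem.List.pyGetD arr i 0, i))]
  rw [show PySem.List.len arr = ((arr.length : Nat) : Int) from rfl,
      PySem.List.pyRange_zero_natCast, List.map_map]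
  have hfn : ((fun i => (PySem.List.pyGetD arr i 0, i)) ∘ fun k : Nat => (k : Int)) =
      fun a : Nat => (arr.getD a 0, (a : Int)) := by
    funext a; simp [PySem.List.pyGetD_natCast]
  rw [hfn]
  simp only [List.nil_append]
  cases hs : PySem.List.sorted ((List.range arr.length).map fun a => (arr.getD a 0, (a : Int)))
      (fun x => x.1) with
  | nil => rfl
  | cons hd t =>
    obtain ⟨v0, i0⟩ := hd
    simp only []
    rw [PySem.List.foldl_pyRange_pyGetD ((v0, i0) :: t) ((0 : Int), (0 : Int))
      (fun (st : Int × Int) e => (max st.1 (e.2 - st.2), min st.2 e.2)) ((0 : Int), i0)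
      (by norm_num)]
    norm_num

theorem insertBy_pairwise_lex (x : Int × Int) :
    ∀ ys : List (Int × Int), ys.Pairwise lexVI → (∀ y ∈ ys, y.2 < x.2) →
    (PySem.List.insertBy (fun a b => decide (a.1 < b.1)) x ys).Pairwise lexVI := by
  intro ys
  induction ys with
  | nil =>
    intro _ _
    rw [PySem.List.insertBy]
    simp
  | cons y ys ih =>
    intro hp hlt
    rw [PySem.List.insertBy]
    by_cases hxy : x.1 < y.1
    · rw [if_pos (by simpa using hxy)]
      refine List.Pairwise.cons ?_ hp
      intro z hz
      rcases List.mem_cons.1 hz with rfl | hz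
      · exact Or.inl hxy
      · have hyz : lexVI y z := (List.pairwise_cons.1 hp).1 z hz
        have : y.1 ≤ z.1 := by rcases hyz with h | ⟨h, _⟩ <;> omega
        exact Or.inl (by omega)
    · rw [if_neg (by simpa using hxy)]
      refine List.Pairwise.cons ?_ (ih (List.pairwise_cons.1 hp).2
        (fun z hz => hlt z (List.mem_cons_of_mem _ hz)))
      intro z hz
      rcases (PySem.List.mem_insertBy _ x z ys).1 hz with rfl | hz'
      · rcases lt_or_eq_of_le (not_lt.1 hxy) with h | h
        · exact Or.inl h
        · exact Or.inr ⟨h, hlt y List.mem_cons_self⟩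
      · exact (List.pairwise_cons.1 hp).1 z hz'

theorem foldl_insertBy_lex :
    ∀ (l acc : List (Int × Int)), acc.Pairwise lexVI →
    (∀ z ∈ acc, ∀ x ∈ l, z.2 < x.2) → l.Pairwise (fun a b => a.2 < b.2) →
    (l.foldl (fun acc x => PySem.List.insertBy (fun a b => decide (a.1 < b.1)) x acc) acc).Pairwise lexVI := by
  intro l
  induction l with
  | nil => intro acc h _ _; simpa using h
  | cons x l ih =>
    intro acc hacc hcross hl
    simp only [List.foldl_cons]
    apply ih
    · exact insertBy_pairwise_lex x acc hacc (fun y hy => hcross y hy x List.mem_cons_self)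
    · intro z hz x' hx'
      rcases (PySem.List.mem_insertBy _ x z acc).1 hz with rfl | hz'
      · exact (List.pairwise_cons.1 hl).1 x' hx'
      · exact hcross z hz' x' (List.mem_cons_of_mem _ hx')
    · exact (List.pairwise_cons.1 hl).2

theorem sorted_enumF_lex (arr : List Int) :
    (PySem.List.sorted (enumF arr) (fun x => x.1)).Pairwise lexVI := by
  rw [PySem.List.sorted_eq_foldl_insertBy]
  apply foldl_insertBy_lex _ [] List.Pairwise.nil (by simp)
  unfold enumF
  rw [List.pairwise_map]
  refine List.pairwise_lt_range.imp ?_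
  intro a b hab
  show (a : Int) < (b : Int)
  exact_mod_cast hab

-- the running (mx, minIndex) fold of A, characterised over the processed prefix
theorem foldA_inv :
    ∀ (rest pre : List (Int × Int)) (mx mi : Int),
    (∀ y ∈ pre, mi ≤ y.2) → (∃ y ∈ pre, mi = y.2) → 0 ≤ mx →
    (mx = 0 ∨ ∃ p q : Nat, p < q ∧ q < pre.length ∧
      mx = (pre.getD q (0, 0)).2 - (pre.getD p (0, 0)).2) →
    (∀ p q : Nat, p < q → q < pre.length →
      (pre.getD q (0, 0)).2 - (pre.getD p (0, 0)).2 ≤ mx) →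
    (0 ≤ (rest.foldl (fun (st : Int × Int) e => (max st.1 (e.2 - st.2), min st.2 e.2)) (mx, mi)).1 ∧
     ((rest.foldl (fun (st : Int × Int) e => (max st.1 (e.2 - st.2), min st.2 e.2)) (mx, mi)).1 = 0 ∨
       ∃ p q : Nat, p < q ∧ q < (pre ++ rest).length ∧
         (rest.foldl (fun (st : Int × Int) e => (max st.1 (e.2 - st.2), min st.2 e.2)) (mx, mi)).1 =
           ((pre ++ rest).getD q (0, 0)).2 - ((pre ++ rest).getD p (0, 0)).2) ∧
     (∀ p q : Nat, p < q → q < (pre ++ rest).length →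
       ((pre ++ rest).getD q (0, 0)).2 - ((pre ++ rest).getD p (0, 0)).2 ≤
         (rest.foldl (fun (st : Int × Int) e => (max st.1 (e.2 - st.2), min st.2 e.2)) (mx, mi)).1)) := by
  intro rest
  induction rest with
  | nil =>
    intro pre mx mi _ _ h0 hre hmax
    simp only [List.foldl_nil, List.append_nil]
    exact ⟨h0, hre, hmax⟩
  | cons e rest ih =>
    intro pre mx mi hlb hatt h0 hre hmax
    have hassoc : pre ++ e :: rest = (pre ++ [e]) ++ rest := by simp
    rw [hassoc, List.foldl_cons]
    have hgetpre : ∀ p : Nat, p < pre.length →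
        ((pre ++ [e]).getD p (0, 0)) = pre.getD p (0, 0) := by
      intro p hp
      rw [List.getD_append _ _ _ _ hp]
    have hgete : (pre ++ [e]).getD pre.length (0, 0) = e := by
      rw [List.getD_append_right _ _ _ _ le_rfl]
      simp
    apply ih (pre ++ [e]) (max mx (e.2 - mi)) (min mi e.2)
    · intro y hy
      rcases List.mem_append.1 hy with hy | hy
      · exact le_trans (min_le_left _ _) (hlb y hy)
      · simp only [List.mem_singleton] at hy
        subst hy
        exact min_le_right _ _
    · by_cases hme : mi ≤ e.2
      · obtain ⟨y, hy, hmi⟩ := hatt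
        exact ⟨y, List.mem_append.2 (Or.inl hy), by rw [min_eq_left hme]; exact hmi⟩
      · exact ⟨e, List.mem_append.2 (Or.inr (by simp)), by rw [min_eq_right (by omega)]⟩
    · exact le_trans h0 (le_max_left _ _)
    · rcases max_cases mx (e.2 - mi) with ⟨hm, _⟩ | ⟨hm, hlt⟩
      · rw [hm]
        rcases hre with h | ⟨p, q, hpq, hq, heq⟩
        · exact Or.inl h
        · refine Or.inr ⟨p, q, hpq, by simp; omega, ?_⟩
          rw [hgetpre p (by omega), hgetpre q hq]
          exact heq
      · rw [hm]
        obtain ⟨y, hy, hmi⟩ := hatt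
        obtain ⟨p, hp, hpe⟩ := List.mem_iff_getElem.1 hy
        refine Or.inr ⟨p, pre.length, hp, by simp, ?_⟩
        rw [hgete, hgetpre p hp, List.getD_eq_getElem _ _ hp, hpe, ← hmi]
    · intro p q hpq hq
      simp only [List.length_append, List.length_singleton] at hq
      by_cases hq' : q < pre.length
      · rw [hgetpre p (by omega), hgetpre q hq']
        exact le_trans (hmax p q hpq hq') (le_max_left _ _)
      · have hq'' : q = pre.length := by omega
        subst hq''
        rw [hgete, hgetpre p (by omega)]
        have hmem : pre.getD p (0, 0) ∈ pre := by
          rw [List.getD_eq_getElem _ _ (by omega)]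
          exact List.getElem_mem _
        have := hlb _ hmem
        have := le_max_right mx (e.2 - mi)
        omega

theorem a_isAns (arr : List Int) (h : arr ≠ []) : IsAns arr (solution arr) := by
  have hn : 0 < arr.length := List.length_pos_iff.mpr h
  rw [solution_eq]
  have hperm : (PySem.List.sorted (enumF arr) (fun x => x.1)).Perm (enumF arr) :=
    PySem.List.sorted_perm _ _ _
  have hlex := sorted_enumF_lex arr
  have hmemc : ∀ z ∈ PySem.List.sorted (enumF arr) (fun x => x.1),
      ∃ a : Nat, a < arr.length ∧ z = (arr.getD a 0, (a : Int)) := by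
    intro z hz
    have := hperm.mem_iff.1 hz
    unfold enumF at this
    simp only [List.mem_map, List.mem_range] at this
    obtain ⟨a, ha, rfl⟩ := this
    exact ⟨a, ha, rfl⟩
  have hmem' : ∀ a : Nat, a < arr.length →
      (arr.getD a 0, (a : Int)) ∈ PySem.List.sorted (enumF arr) (fun x => x.1) := by
    intro a ha
    apply hperm.mem_iff.2
    unfold enumF
    simp only [List.mem_map, List.mem_range]
    exact ⟨a, ha, rfl⟩
  cases hsc : PySem.List.sorted (enumF arr) (fun x => x.1) with
  | nil =>
    exfalso
    rw [PySem.List.sorted_eq_nil_iff] at hsc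
    have hlen0 : (enumF arr).length = 0 := by rw [hsc]; rfl
    unfold enumF at hlen0
    rw [List.length_map, List.length_range] at hlen0
    omega
  | cons hd t =>
    obtain ⟨v0, i0⟩ := hd
    rw [hsc] at hlex hmemc hmem'
    show IsAns arr
      ((t.foldl (fun (st : Int × Int) e => (max st.1 (e.2 - st.2), min st.2 e.2)) (0, i0)).1)
    obtain ⟨hpos, hreal, hmaxp⟩ := foldA_inv t [(v0, i0)] 0 i0 (by simp)
      ⟨(v0, i0), by simp⟩ le_rfl (Or.inl rfl)
      (by intro p q hpq hq; simp only [List.length_singleton] at hq; omega)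
    simp only [List.singleton_append] at hreal hmaxp
    set mx := (t.foldl (fun (st : Int × Int) e => (max st.1 (e.2 - st.2), min st.2 e.2))
      ((0 : Int), i0)).1 with hmx
    have hpw := List.pairwise_iff_getElem.1 hlex
    constructor
    · -- Cand arr mx
      rcases hreal with h0 | ⟨p, q, hpq, hq, heq⟩
      · refine ⟨0, 0, le_rfl, hn, le_rfl, ?_⟩
        rw [h0]
        norm_num
      · have hp : p < ((v0, i0) :: t).length := by omega
        obtain ⟨a, han, ha⟩ := hmemc _ (List.getElem_mem hp)
        obtain ⟨b, hbn, hb⟩ := hmemc _ (List.getElem_mem hq)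
        have hlx := hpw p q hp hq hpq
        rw [ha, hb] at hlx
        have hvle : arr.getD a 0 ≤ arr.getD b 0 := by
          rcases hlx with hlt | ⟨heq1, _⟩
          · exact le_of_lt hlt
          · exact le_of_eq heq1
        rw [List.getD_eq_getElem _ _ hq, List.getD_eq_getElem _ _ hp] at heq
        rw [ha, hb] at heq
        have heq' : mx = (b : Int) - (a : Int) := heq
        have hab : a ≤ b := by omega
        exact ⟨a, b, hab, hbn, hvle, heq'⟩
    · -- maximality
      rintro y ⟨a, b, hab, hbn, hv, rfl⟩
      rcases Nat.eq_or_lt_of_le hab with rfl | hab'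
      · omega
      · obtain ⟨p, hp, hpe⟩ := List.mem_iff_getElem.1 (hmem' a (by omega))
        obtain ⟨q, hq, hqe⟩ := List.mem_iff_getElem.1 (hmem' b hbn)
        rcases Nat.lt_trichotomy p q with hpq | hpq | hpq
        · have h2 := hmaxp p q hpq hq
          rw [List.getD_eq_getElem _ _ hq, List.getD_eq_getElem _ _ hp] at h2
          rw [hpe, hqe] at h2
          exact h2
        · exfalso
          subst hpq
          have hee := hpe.symm.trans hqe
          have : (a : Int) = (b : Int) := congrArg Prod.snd hee
          omega
        · exfalso
          have hlx := hpw q p hq hp hpq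
          rw [hpe, hqe] at hlx
          rcases hlx with hlt | ⟨_, hlt⟩
          · have h1 : arr.getD b 0 < arr.getD a 0 := hlt
            omega
          · have h1 : (b : Int) < (a : Int) := hlt
            omega

-- ===== VERDICT =====
theorem solution_spec : Claim_equal_solution := by
  intro arr _ hpre
  unfold Spec_solution
  exact isAns_unique (a_isAns arr hpre) (alt_isAns arr hpre)
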